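-- pv_equiv track=rewrite | github.com/Alejandro120603/StreakUp | backend/app/schemas/habit_validations.py | _normalize_schedule_days
-- ===== SOURCE A (Python) =====
-- _VALID_WEEKDAYS = frozenset(range(7))  # 0=Mon … 6=Sun
--
-- def _normalize_schedule_days(value: object) -> tuple[list[int] | None, str | None]:
--     """Validate and deduplicate a list of weekday integers (0–6)."""
--     if value is None:
--         return None, None
--     if not isinstance(value, list):
--         return None, "schedule_days must be a list of integers."
--
--     seen: set[int] = set()
--     result: list[int] = []
--     for item in value:
--         if isinstance(item, bool) or not isinstance(item, int):
--             return None, "Each entry in schedule_days must be an integer."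
--         if item not in _VALID_WEEKDAYS:
--             return None, f"schedule_days entries must be between 0 (Mon) and 6 (Sun); got {item}."
--         if item not in seen:
--             seen.add(item)
--             result.append(item)
--
--     return sorted(result), None
-- ===== SOURCE B (Python) =====
-- def _normalize_schedule_days(value: object) -> tuple[list[int] | None, str | None]:
--     """Validate and deduplicate a list of weekday integers (0-6)."""
--     if value is None:
--         return None, None
--     if not isinstance(value, list):
--         return None, "schedule_days must be a list of integers."
--
--     present = [False] * 7
--     for item in value:
--         if isinstance(item, bool) or not isinstance(item, int):
--             return None, "Each entry in schedule_days must be an integer."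
--         if not (0 <= item <= 6):
--             return None, f"schedule_days entries must be between 0 (Mon) and 6 (Sun); got {item}."
--         present[item] = True
--
--     return [d for d in range(7) if present[d]], None
-- ===== Notes on version B (the rewrite author's own statement) =====
-- stated objective: alternative
-- what changed: B replaces the seen-set plus collect-then-sort(result) with a fixed 7-slot presence array marked during the validation loop and a final positional scan over range(7), which emits the deduplicated weekdays already in ascending order with no sort and no dedup bookkeeping.
import Mathlib
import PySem

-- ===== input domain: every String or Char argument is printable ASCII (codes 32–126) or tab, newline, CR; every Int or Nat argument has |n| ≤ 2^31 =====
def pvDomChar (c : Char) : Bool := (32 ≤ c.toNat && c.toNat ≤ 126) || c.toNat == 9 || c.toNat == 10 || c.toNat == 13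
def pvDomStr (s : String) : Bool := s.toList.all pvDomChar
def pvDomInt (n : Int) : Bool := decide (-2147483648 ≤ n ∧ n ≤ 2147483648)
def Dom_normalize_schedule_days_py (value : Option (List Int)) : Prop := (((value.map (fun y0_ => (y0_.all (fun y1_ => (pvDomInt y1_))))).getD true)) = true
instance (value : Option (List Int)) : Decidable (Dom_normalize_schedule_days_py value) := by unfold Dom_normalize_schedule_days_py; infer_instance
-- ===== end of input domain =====

-- B marks a fixed 7-slot presence array and emits the result by a positional scan over
-- range(7) (already sorted, already deduplicated), instead of A's seen-set + sorted(result).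
-- Under the type convention (value : Option (List Int)) the isinstance branches of both
-- Pythons are unreachable and are not ported.

-- ===== PORT A =====
-- _VALID_WEEKDAYS = frozenset(range(7))
def pvValidWeekdays : PySem.Set Int := PySem.Set.ofList (PySem.List.pyRange 0 7 1)

-- the 'for item in value' loop with its early returns; state = (seen, result)
def pvALoop : List Int → PySem.Set Int → List Int → Option (List Int) × Option String
  | [], _, result => (some (PySem.List.sorted result (fun x => x) false), none)
  | item :: rest, seen, result =>
      if ¬ (PySem.Set.contains pvValidWeekdays item = true) then
        (none, some ("schedule_days entries must be between 0 (Mon) and 6 (Sun); got "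
                      ++ PySem.Int.toStr item ++ "."))
      else if PySem.Set.contains seen item = true then
        pvALoop rest seen result
      else
        pvALoop rest (PySem.Set.add seen item) (result ++ [item])

def normalize_schedule_days_py (value : Option (List Int)) : Option (List Int) × Option String :=
  match value with
  | none => (none, none)
  | some l => pvALoop l PySem.Set.empty []

-- ===== PORT B =====
-- the 'for item in value' loop of Source B; state = present (a list of 7 booleans);
-- present[item] = True is List.set (item is proved in range first, exactly as in Source B),
-- and present[d] for d in range(7) is getD (always in range: present has length 7).
def pvBLoop : List Int → List Bool → Option (List Int) × Option String
  | [], present =>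
      (some ((PySem.List.pyRange 0 7 1).filter (fun d => present.getD d.toNat false)), none)
  | item :: rest, present =>
      if ¬ (0 ≤ item ∧ item ≤ 6) then
        (none, some ("schedule_days entries must be between 0 (Mon) and 6 (Sun); got "
                      ++ PySem.Int.toStr item ++ "."))
      else
        pvBLoop rest (present.set item.toNat true)

def normalize_schedule_days_py_alt (value : Option (List Int)) : Option (List Int) × Option String :=
  match value with
  | none => (none, none)
  | some l => pvBLoop l (List.replicate 7 false)

-- ===== PRECONDITION & SPEC =====
def Spec_normalize_schedule_days_py (value : Option (List Int)) (out : Option (List Int) × Option String) : Prop := out = normalize_schedule_days_py_alt value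
instance (value : Option (List Int)) (out : Option (List Int) × Option String) : Decidable (Spec_normalize_schedule_days_py value out) := by unfold Spec_normalize_schedule_days_py; infer_instance

-- ===== CLAIM (what is proved, stated in full; the proofs are below) =====
def Claim_equal_normalize_schedule_days_py : Prop := ∀ (value : Option (List Int)), Dom_normalize_schedule_days_py value → Spec_normalize_schedule_days_py value (normalize_schedule_days_py value)

-- ===== LEMMAS AND PROOFS =====

-- A's validity test (membership in frozenset(range(7))) is the interval test of B.
lemma pv_valid_iff (item : Int) :
    PySem.Set.contains pvValidWeekdays item = true ↔ 0 ≤ item ∧ item ≤ 6 := by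
  rw [PySem.Set.contains_iff, pvValidWeekdays, PySem.Set.mem_ofList, PySem.List.mem_pyRange_one]
  omega

-- at the end of the loops: sorted(result) is the presence-filtered range(7)
lemma pv_sorted_eq_filter (result : List Int) (present : List Bool)
    (hnd : result.Nodup) (hbd : ∀ x ∈ result, 0 ≤ x ∧ x ≤ 6)
    (hinv : ∀ d : Nat, d < 7 → present.getD d false = decide ((d : Int) ∈ result)) :
    PySem.List.sorted result (fun x => x) false
      = (PySem.List.pyRange 0 7 1).filter (fun d => present.getD d.toNat false) := by
  have hcongr : (PySem.List.pyRange 0 7 1).filter (fun d => present.getD d.toNat false)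
      = (PySem.List.pyRange 0 7 1).filter (fun d => decide (d ∈ result)) := by
    apply List.filter_congr
    intro x hx
    rw [PySem.List.mem_pyRange_one] at hx
    have h7 : x.toNat < 7 := by omega
    have := hinv x.toNat h7
    rw [this]
    have : ((x.toNat : Int)) = x := by omega
    rw [this]
  rw [hcongr]
  apply PySem.List.sorted_eq_of_perm_of_pairwise_lt
  · rw [List.perm_ext_iff_of_nodup (List.Nodup.filter _ (PySem.List.nodup_pyRange_one 0 7)) hnd]
    intro a
    simp only [List.mem_filter, PySem.List.mem_pyRange_one, decide_eq_true_eq]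
    constructor
    · exact fun h => h.2
    · intro h; exact ⟨by have := hbd a h; omega, h⟩
  · exact List.Pairwise.filter _ (PySem.List.pairwise_lt_pyRange_one 0 7)

lemma pv_loop_eq (rest : List Int) : ∀ (result : List Int) (present : List Bool),
    result.Nodup → (∀ x ∈ result, 0 ≤ x ∧ x ≤ 6) → present.length = 7 →
    (∀ d : Nat, d < 7 → present.getD d false = decide ((d : Int) ∈ result)) →
    pvALoop rest result result = pvBLoop rest present := by
  induction rest with
  | nil =>
      intro result present hnd hbd hlen hinv
      simp only [pvALoop, pvBLoop]
      rw [pv_sorted_eq_filter result present hnd hbd hinv]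
  | cons item rest ih =>
      intro result present hnd hbd hlen hinv
      rw [pvALoop, pvBLoop]
      by_cases hv : 0 ≤ item ∧ item ≤ 6
      · have hA1 : ¬ ¬ (PySem.Set.contains pvValidWeekdays item = true) := by
          rw [pv_valid_iff]; exact not_not_intro hv
        have hB1 : ¬ ¬ (0 ≤ item ∧ item ≤ 6) := not_not_intro hv
        rw [if_neg hA1, if_neg hB1]
        have hlen' : (present.set item.toNat true).length = 7 := by
          rw [List.length_set]; exact hlen
        by_cases hm : item ∈ result
        · have hc : PySem.Set.contains result item = true := by
            rw [PySem.Set.contains_iff]; exact hm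
          rw [if_pos hc]
          apply ih result _ hnd hbd hlen'
          intro d hd
          rcases eq_or_ne d item.toNat with h | h
          · subst h
            rw [List.getD_eq_getElem _ _ (by omega), List.getElem_set_self (by omega)]
            have : ((item.toNat : Int)) = item := by omega
            rw [this]; simp [hm]
          · rw [List.getD_eq_getElem _ _ (by omega),
                List.getElem_set_ne (h := by omega) (by omega),
                ← List.getD_eq_getElem _ _ (by omega)]
            exact hinv d hd
        · have hc : ¬ PySem.Set.contains result item = true := by
            rw [PySem.Set.contains_iff]; exact hm
          rw [if_neg hc]
          have hadd : PySem.Set.add result item = result ++ [item] := by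
            simp only [PySem.Set.add]; rw [if_neg hc]
          rw [hadd]
          apply ih (result ++ [item]) _
            (by simp [List.nodup_append, hnd]; exact fun a ha h => hm (h ▸ ha))
            (by intro x hx; rcases List.mem_append.mp hx with h | h
                · exact hbd x h
                · simp at h; omega)
            hlen'
          intro d hd
          rcases eq_or_ne d item.toNat with h | h
          · subst h
            rw [List.getD_eq_getElem _ _ (by omega), List.getElem_set_self (by omega)]
            have : ((item.toNat : Int)) = item := by omega
            rw [this]; simp
          · rw [List.getD_eq_getElem _ _ (by omega),
                List.getElem_set_ne (h := by omega) (by omega),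
                ← List.getD_eq_getElem _ _ (by omega), hinv d hd]
            have : ((d : Int)) ≠ item := by omega
            simp [this]
      · have hA1 : ¬ (PySem.Set.contains pvValidWeekdays item = true) := by
          rw [pv_valid_iff]; exact hv
        rw [if_pos hA1, if_pos hv]

-- ===== VERDICT (by name: the statement is the Claim_ definition above) =====
theorem normalize_schedule_days_py_spec : Claim_equal_normalize_schedule_days_py := by
  intro value _
  unfold Spec_normalize_schedule_days_py normalize_schedule_days_py normalize_schedule_days_py_alt
  match value with
  | none => rfl
  | some l =>
      exact pv_loop_eq l [] (List.replicate 7 false) (by simp) (by simp) (by simp)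
        (by intro d hd
            rw [List.getD_eq_getElem _ _ (by simp; omega)]
            interval_cases d <;> rfl)
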